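-- pv_equiv track=rewrite | github.com/ThriceInATrice/advent_of_code_2024 | dec_8th/dec_8th.py | get_antenas
-- ===== SOURCE A (Python) =====
-- def get_antenas(line_data):
--     acceptable_symbol_codes = (
--         [i for i in range(48, 58)]
--         + [i for i in range(65, 91)]
--         + [i for i in range(97, 123)]
--     )
--
--     antenas = [
--         coord_list
--         for coord_list in [
--             [
--                 (y, x)
--                 for y in range(len(line_data))
--                 for x in range(len(line_data[y]))
--                 if line_data[y][x] == chr(ascii_code)
--             ]
--             for ascii_code in acceptable_symbol_codes
--         ]
--         if coord_list != []
--     ]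
--
--     return antenas
-- ===== SOURCE B (Python) =====
-- def get_antenas(line_data):
--     groups = {}
--     for y, line in enumerate(line_data):
--         for x, c in enumerate(line):
--             if '0' <= c <= '9' or 'A' <= c <= 'Z' or 'a' <= c <= 'z':
--                 groups.setdefault(c, []).append((y, x))
--     return [groups[c] for c in sorted(groups)]
-- ===== Notes on version B (the rewrite author's own statement) =====
-- stated objective: faster
-- what changed: Instead of scanning the whole grid once per each of 62 candidate symbols, B makes a single pass over the grid grouping coordinates into a dict keyed by symbol, then emits the groups in sorted (ASCII) key order.
import Mathlib
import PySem

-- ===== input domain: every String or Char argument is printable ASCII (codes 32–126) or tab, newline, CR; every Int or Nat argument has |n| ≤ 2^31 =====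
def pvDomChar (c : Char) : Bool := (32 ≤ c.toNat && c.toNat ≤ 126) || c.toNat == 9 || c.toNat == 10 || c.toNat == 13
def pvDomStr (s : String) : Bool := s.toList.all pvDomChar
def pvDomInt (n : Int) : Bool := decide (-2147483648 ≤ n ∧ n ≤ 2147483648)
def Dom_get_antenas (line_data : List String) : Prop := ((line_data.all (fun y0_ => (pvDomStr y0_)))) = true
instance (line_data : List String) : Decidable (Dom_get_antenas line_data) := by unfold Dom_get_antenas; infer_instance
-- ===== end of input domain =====

-- B replaces A's 62 full-grid scans (one per candidate symbol) by a single grouping pass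
-- over the grid into a dict keyed by symbol, emitted in sorted key order (objective: faster).

-- ===== PORT A =====
def get_antenas (line_data : List String) : List (List (Int × Int)) :=
  let acceptable_symbol_codes : List Int :=
    PySem.List.pyRange 48 58 1 ++ PySem.List.pyRange 65 91 1 ++ PySem.List.pyRange 97 123 1
  let antenas :=
    ((acceptable_symbol_codes.map (fun ascii_code =>
        (PySem.List.pyRange 0 (line_data.length : Int) 1).flatMap (fun y =>
          (PySem.List.pyRange 0 ((PySem.List.pyGetD line_data y "").toList.length : Int) 1).filterMap
            (fun x =>
              if PySem.List.pyGetD (PySem.List.pyGetD line_data y "").toList x ' '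
                   == Char.ofNat ascii_code.toNat
              then some (y, x) else none)))).filter (fun coord_list => decide (coord_list ≠ [])))
  antenas

-- ===== PORT B =====
def get_antenas_alt (line_data : List String) : List (List (Int × Int)) :=
  let groups : PySem.Dict Char (List (Int × Int)) :=
    (PySem.List.enumerate line_data).foldl (fun groups yl =>
      (PySem.List.enumerate yl.2.toList).foldl (fun groups xc =>
        if ('0' ≤ xc.2 ∧ xc.2 ≤ '9') ∨ ('A' ≤ xc.2 ∧ xc.2 ≤ 'Z') ∨ ('a' ≤ xc.2 ∧ xc.2 ≤ 'z')
        then groups.modify xc.2 [] (· ++ [(yl.1, xc.1)])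
        else groups) groups) PySem.Dict.empty
  (PySem.List.sorted groups.keys (fun c => c) false).map (fun c => groups.getD c [])

-- ===== PRECONDITION & SPEC =====
def Spec_get_antenas (line_data : List String) (out : List (List (Int × Int))) : Prop := out = get_antenas_alt line_data
instance (line_data : List String) (out : List (List (Int × Int))) : Decidable (Spec_get_antenas line_data out) := by unfold Spec_get_antenas; infer_instance

-- ===== CLAIM (what is proved, stated in full; the proofs are below) =====
def Claim_equal_get_antenas : Prop := ∀ (line_data : List String), Dom_get_antenas line_data → Spec_get_antenas line_data (get_antenas line_data)

-- ===== LEMMAS AND PROOFS =====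

-- the flat list of grid cells: (symbol, (row, column)) in scan order
def pvCells (line_data : List String) : List (Char × (Int × Int)) :=
  (PySem.List.enumerate line_data).flatMap (fun yl =>
    (PySem.List.enumerate yl.2.toList).map (fun xc => (xc.2, (yl.1, xc.1))))

-- B's acceptability test as a Bool predicate
def pvOk (c : Char) : Bool :=
  decide (('0' ≤ c ∧ c ≤ '9') ∨ ('A' ≤ c ∧ c ≤ 'Z') ∨ ('a' ≤ c ∧ c ≤ 'z'))

-- the group of coordinates carrying symbol c, in scan order
def pvGroup (line_data : List String) (c : Char) : List (Int × Int) :=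
  ((pvCells line_data).filter (fun p => p.1 == c)).map (fun p => p.2)

lemma pv_filterMap_if {α β : Type} (l : List α) (p : α → Bool) (f : α → β) :
    l.filterMap (fun x => if p x then some (f x) else none) = (l.filter p).map f := by
  induction l with
  | nil => rfl
  | cons a t ih =>
    by_cases h : p a = true <;> simp [h, ih]

lemma pv_toNat_ofNat (n : Nat) (h : n < 1000) : (Char.ofNat n).toNat = n := by
  have hv : Nat.isValidChar n := Or.inl (by omega)
  rw [Char.ofNat, dif_pos hv]; rfl

-- A's per-symbol double scan over indices is the filter of the flat cell list
lemma pv_scanA (line_data : List String) (c : Char) :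
    (PySem.List.pyRange 0 (line_data.length : Int) 1).flatMap (fun y =>
      (PySem.List.pyRange 0 ((PySem.List.pyGetD line_data y "").toList.length : Int) 1).filterMap
        (fun x =>
          if PySem.List.pyGetD (PySem.List.pyGetD line_data y "").toList x ' ' == c
          then some (y, x) else none)) = pvGroup line_data c := by
  rw [pvGroup, pvCells, List.filter_flatMap, List.map_flatMap]
  rw [PySem.List.enumerate_eq_map_pyRange line_data ""]
  rw [List.flatMap_map]
  congr 1
  funext y
  rw [PySem.List.enumerate_eq_map_pyRange (PySem.List.pyGetD line_data y "").toList ' ']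
  simp only [List.filter_map, List.map_map, pv_filterMap_if, PySem.List.len]
  rfl

-- B's nested grouping loop is the flat fold over the acceptable cells
lemma pv_groups_eq (line_data : List String) :
    ((PySem.List.enumerate line_data).foldl (fun groups yl =>
      (PySem.List.enumerate yl.2.toList).foldl (fun groups xc =>
        if ('0' ≤ xc.2 ∧ xc.2 ≤ '9') ∨ ('A' ≤ xc.2 ∧ xc.2 ≤ 'Z') ∨ ('a' ≤ xc.2 ∧ xc.2 ≤ 'z')
        then groups.modify xc.2 [] (· ++ [(yl.1, xc.1)])
        else groups) groups) (PySem.Dict.empty : PySem.Dict Char (List (Int × Int)))) =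
    ((pvCells line_data).filter (fun p => pvOk p.1)).foldl
      (fun d p => d.modify p.1 [] (· ++ [p.2])) PySem.Dict.empty := by
  rw [pvCells, List.filter_flatMap, List.foldl_flatMap]
  apply PySem.List.foldl_congr_mem
  intro d yl _
  rw [PySem.List.foldl_ite_eq_foldl_filter, List.filter_map, List.foldl_map]
  rw [List.filter_congr (q := (fun p => pvOk p.1) ∘ fun xc => (xc.2, (yl.1, xc.1)))
      (by intro x _; simp [pvOk, Function.comp])]

-- symbol membership: c appears among A's 62 acceptable symbols iff pvOk c
lemma pv_ok_iff (c : Char) :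
    pvOk c = true ↔
      (48 ≤ c.toNat ∧ c.toNat ≤ 57) ∨ (65 ≤ c.toNat ∧ c.toNat ≤ 90) ∨
        (97 ≤ c.toNat ∧ c.toNat ≤ 122) := by
  have h : ∀ a b : Char, (a ≤ b) ↔ a.toNat ≤ b.toNat := fun a b => Iff.rfl
  simp only [pvOk, decide_eq_true_eq, h,
    show ('0':Char).toNat = 48 from rfl, show ('9':Char).toNat = 57 from rfl,
    show ('A':Char).toNat = 65 from rfl, show ('Z':Char).toNat = 90 from rfl,
    show ('a':Char).toNat = 97 from rfl, show ('z':Char).toNat = 122 from rfl]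

lemma pv_mem_symbols (c : Char) :
    c ∈ (PySem.List.pyRange 48 58 1 ++ PySem.List.pyRange 65 91 1 ++ PySem.List.pyRange 97 123 1).map
          (fun code => Char.ofNat code.toNat) ↔ pvOk c = true := by
  simp only [List.mem_map, List.mem_append, PySem.List.mem_pyRange_one]
  constructor
  · rintro ⟨code, hc, rfl⟩
    have ht : (Char.ofNat code.toNat).toNat = code.toNat := pv_toNat_ofNat _ (by omega)
    rw [pv_ok_iff, ht]
    omega
  · intro hok
    rw [pv_ok_iff] at hok
    refine ⟨(c.toNat : Int), by omega, ?_⟩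
    simp only [Int.toNat_natCast]
    exact Char.ofNat_toNat c

-- a group is nonempty iff some cell carries the symbol
lemma pv_group_ne_nil (line_data : List String) (c : Char) :
    pvGroup line_data c ≠ [] ↔ ∃ p ∈ pvCells line_data, p.1 = c := by
  rw [pvGroup]
  simp [List.filter_eq_nil_iff]

-- the sorted key list of B's dict is exactly A's symbol order restricted to nonempty groups
lemma pv_sorted_keys (line_data : List String) :
    PySem.List.sorted
      (PySem.Set.ofList (((pvCells line_data).filter (fun p => pvOk p.1)).map (fun p => p.1)))
      (fun c => c) false =
    ((PySem.List.pyRange 48 58 1 ++ PySem.List.pyRange 65 91 1 ++ PySem.List.pyRange 97 123 1).map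
        (fun code => Char.ofNat code.toNat)).filter
      (fun c => decide (pvGroup line_data c ≠ [])) := by
  have hsym : ((PySem.List.pyRange 48 58 1 ++ PySem.List.pyRange 65 91 1 ++
      PySem.List.pyRange 97 123 1).map (fun code => Char.ofNat code.toNat)).Nodup := by decide
  have hpw : ((PySem.List.pyRange 48 58 1 ++ PySem.List.pyRange 65 91 1 ++
      PySem.List.pyRange 97 123 1).map (fun code => Char.ofNat code.toNat)).Pairwise
      (fun a b => a < b) := by decide
  apply PySem.List.sorted_eq_of_perm_of_pairwise_lt
  · rw [List.perm_ext_iff_of_nodup (hsym.filter _) (PySem.Set.nodup_ofList _)]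
    intro c
    rw [List.mem_filter, PySem.Set.mem_ofList, pv_mem_symbols, decide_eq_true_eq,
      pv_group_ne_nil]
    simp only [List.mem_map, List.mem_filter]
    constructor
    · rintro ⟨hok, p, hp, rfl⟩
      exact ⟨p, ⟨hp, hok⟩, rfl⟩
    · rintro ⟨p, ⟨hp, hok⟩, rfl⟩
      exact ⟨hok, p, hp, rfl⟩
  · exact hpw.sublist List.filter_sublist

-- filtering a group out of the acceptable cells only is the full group, for an acceptable symbol
lemma pv_filter_ok (line_data : List String) (c : Char) (hok : pvOk c = true) :
    (((pvCells line_data).filter (fun p => pvOk p.1)).filter (fun p => p.1 == c)).map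
        (fun p => p.2) = pvGroup line_data c := by
  rw [pvGroup, List.filter_filter]
  congr 1
  apply List.filter_congr
  intro p _
  by_cases h : p.1 = c
  · simp [h, hok]
  · simp [h]

-- ===== VERDICT (by name: the statement is the Claim_ definition above) =====
theorem get_antenas_spec : Claim_equal_get_antenas := by
  intro line_data _
  unfold Spec_get_antenas get_antenas get_antenas_alt
  dsimp only
  rw [pv_groups_eq]
  simp only [pv_scanA]
  rw [show (fun ascii_code : Int => pvGroup line_data (Char.ofNat ascii_code.toNat)) =
      pvGroup line_data ∘ (fun code => Char.ofNat code.toNat) from rfl,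
    ← List.map_map, List.filter_map]
  rw [PySem.Dict.keys_foldl_modify_key (key := fun p : Char × (Int × Int) => p.1)]
  rw [show PySem.Set.update (PySem.Dict.empty : PySem.Dict Char (List (Int × Int))).keys
        (((pvCells line_data).filter (fun p => pvOk p.1)).map (fun p => p.1)) =
      PySem.Set.ofList (((pvCells line_data).filter (fun p => pvOk p.1)).map (fun p => p.1))
    from rfl]
  rw [pv_sorted_keys]
  apply Eq.symm
  apply List.map_congr_left
  intro c hc
  have hok : pvOk c = true := by
    rcases List.mem_filter.mp hc with ⟨hmem, _⟩
    exact (pv_mem_symbols c).mp hmem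
  rw [PySem.Dict.getD_foldl_modify_append, PySem.Dict.getD_empty, List.nil_append,
    pv_filter_ok line_data c hok]
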